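-- pv_equiv track=rewrite | github.com/basvasilich/advent-of-code-2024 | day6/solution.py | scan_left
-- ===== SOURCE A (Python) =====
-- def scan_left(a_rows: dict[int, list[int]], a_cols: dict[int, list[int]], l_rows, l_cols, start: (int, int)) -> (int, int):
--     s_row, s_col = start
--     if s_row not in a_rows.keys():
--         return None
--
--     obstacles = a_rows[s_row]
--     for i in range(len(obstacles) - 1, -1, -1):
--         obstacle = obstacles[i]
--         if obstacle < s_col:
--             return s_row, obstacle + 1
--     return None
-- ===== SOURCE B (Python) =====
-- def scan_left(a_rows, a_cols, l_rows, l_cols, start):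
--     # Single forward pass keeping the last obstacle left of the start column
--     # (equals A's backward scan's first hit). Same O(n), simpler decomposition.
--     s_row, s_col = start
--     if s_row not in a_rows:
--         return None
--     best = None
--     for o in a_rows[s_row]:
--         if o < s_col:
--             best = o
--     return None if best is None else (s_row, best + 1)
-- ===== Notes on version B (the rewrite author's own statement) =====
-- stated objective: simpler
-- what changed: A scans the obstacle list backwards by index and returns at the first obstacle < s_col; B does one forward pass over the values keeping the last obstacle < s_col seen, with no index arithmetic.
import Mathlib
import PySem

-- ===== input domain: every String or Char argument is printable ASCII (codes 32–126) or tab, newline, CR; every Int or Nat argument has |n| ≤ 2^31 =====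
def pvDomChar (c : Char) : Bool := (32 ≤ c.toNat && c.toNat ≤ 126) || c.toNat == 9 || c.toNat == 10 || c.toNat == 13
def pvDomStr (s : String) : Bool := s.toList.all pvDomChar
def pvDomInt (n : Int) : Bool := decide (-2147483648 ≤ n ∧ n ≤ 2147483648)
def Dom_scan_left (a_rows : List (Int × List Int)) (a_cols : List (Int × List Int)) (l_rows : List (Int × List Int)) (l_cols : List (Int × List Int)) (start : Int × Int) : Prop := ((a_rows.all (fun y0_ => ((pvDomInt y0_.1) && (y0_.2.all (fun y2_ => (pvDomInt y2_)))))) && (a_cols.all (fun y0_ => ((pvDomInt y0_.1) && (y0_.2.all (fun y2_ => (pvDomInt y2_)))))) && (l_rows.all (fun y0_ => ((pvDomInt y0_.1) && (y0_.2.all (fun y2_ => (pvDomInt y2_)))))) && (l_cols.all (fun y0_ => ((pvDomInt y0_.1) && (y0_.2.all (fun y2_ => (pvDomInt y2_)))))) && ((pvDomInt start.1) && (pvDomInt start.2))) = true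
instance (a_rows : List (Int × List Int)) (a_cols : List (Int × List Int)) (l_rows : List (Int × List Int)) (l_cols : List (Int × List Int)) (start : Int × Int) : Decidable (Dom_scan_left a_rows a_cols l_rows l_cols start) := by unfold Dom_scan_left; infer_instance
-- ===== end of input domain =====

-- B replaces A's backward index loop with one forward pass keeping the last obstacle < s_col (simpler, no index arithmetic); same O(n).

-- ===== PORT A =====
-- the `for i in range(len(obstacles)-1, -1, -1)` loop with its early return
def scanLeftLoopA (obstacles : List Int) (s_row s_col : Int) : List Int → Option (Int × Int)
  | [] => none
  | i :: rest =>
    match PySem.List.pyGet? obstacles i with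
    | none => none   -- IndexError; unreachable since i ∈ range(len-1, -1, -1)
    | some obstacle =>
      if obstacle < s_col then some (s_row, obstacle + 1)
      else scanLeftLoopA obstacles s_row s_col rest

def scan_left (a_rows : List (Int × List Int)) (a_cols : List (Int × List Int)) (l_rows : List (Int × List Int)) (l_cols : List (Int × List Int)) (start : Int × Int) : Option (Int × Int) :=
  let s_row := start.1
  let s_col := start.2
  match (PySem.Dict.mk a_rows).get? s_row with
  | none => none
  | some obstacles =>
      scanLeftLoopA obstacles s_row s_col
        (PySem.List.pyRange ((obstacles.length : Int) - 1) (-1) (-1))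

-- ===== PORT B =====
def scan_left_alt (a_rows : List (Int × List Int)) (a_cols : List (Int × List Int)) (l_rows : List (Int × List Int)) (l_cols : List (Int × List Int)) (start : Int × Int) : Option (Int × Int) :=
  let s_row := start.1
  let s_col := start.2
  match (PySem.Dict.mk a_rows).get? s_row with
  | none => none
  | some obstacles =>
      match obstacles.foldl (fun best o => if o < s_col then some o else best) (none : Option Int) with
      | none => none
      | some b => some (s_row, b + 1)

-- ===== PRECONDITION & SPEC =====
def Spec_scan_left (a_rows : List (Int × List Int)) (a_cols : List (Int × List Int)) (l_rows : List (Int × List Int)) (l_cols : List (Int × List Int)) (start : Int × Int) (out : Option (Int × Int)) : Prop := out = scan_left_alt a_rows a_cols l_rows l_cols start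
instance (a_rows : List (Int × List Int)) (a_cols : List (Int × List Int)) (l_rows : List (Int × List Int)) (l_cols : List (Int × List Int)) (start : Int × Int) (out : Option (Int × Int)) : Decidable (Spec_scan_left a_rows a_cols l_rows l_cols start out) := by unfold Spec_scan_left; infer_instance

-- ===== CLAIM (what is proved, stated in full; the proofs are below) =====
def Claim_equal_scan_left : Prop := ∀ (a_rows : List (Int × List Int)) (a_cols : List (Int × List Int)) (l_rows : List (Int × List Int)) (l_cols : List (Int × List Int)) (start : Int × Int), Dom_scan_left a_rows a_cols l_rows l_cols start → Spec_scan_left a_rows a_cols l_rows l_cols start (scan_left a_rows a_cols l_rows l_cols start)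

-- ===== LEMMAS AND PROOFS =====

-- A's loop only reads the list through pyGet? at the given indices
theorem scanLeftLoopA_congr (xs ys : List Int) (r c : Int) (l : List Int)
    (h : ∀ i ∈ l, PySem.List.pyGet? xs i = PySem.List.pyGet? ys i) :
    scanLeftLoopA xs r c l = scanLeftLoopA ys r c l := by
  induction l with
  | nil => rfl
  | cons i rest ih =>
    simp only [scanLeftLoopA, h i (by simp)]
    exact match PySem.List.pyGet? ys i with
    | none => rfl
    | some o => by
      by_cases ho : o < c <;>
        simp [ho, ih (fun j hj => h j (List.mem_cons_of_mem _ hj))]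

-- core: backward first-hit scan = forward fold keeping the last hit
theorem scanA_eq_foldl (xs : List Int) (r c : Int) :
    scanLeftLoopA xs r c (PySem.List.pyRange ((xs.length : Int) - 1) (-1) (-1))
      = match xs.foldl (fun best o => if o < c then some o else best) (none : Option Int) with
        | none => none
        | some b => some (r, b + 1) := by
  induction xs using List.reverseRecOn with
  | nil =>
    simp [PySem.List.pyRange_neg_one_eq_nil (by norm_num : (-1 : Int) ≤ -1), scanLeftLoopA]
  | append_singleton xs x ih =>
    have hlen : ((xs ++ [x]).length : Int) - 1 = (xs.length : Int) := by
      simp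
    rw [hlen, PySem.List.pyRange_neg_one_cons (by omega)]
    have hget : PySem.List.pyGet? (xs ++ [x]) (xs.length : Int) = some x := by
      simp [PySem.List.pyGet?, PySem.List.pyIdx?]
    have hcongr : scanLeftLoopA (xs ++ [x]) r c
        (PySem.List.pyRange ((xs.length : Int) - 1) (-1) (-1))
        = scanLeftLoopA xs r c (PySem.List.pyRange ((xs.length : Int) - 1) (-1) (-1)) := by
      apply scanLeftLoopA_congr
      intro i hi
      rw [PySem.List.mem_pyRange_neg_one] at hi
      have h0 : 0 ≤ i := by omega
      have h1 : i < (xs.length : Int) := by omega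
      have h2 : i.toNat < xs.length := by omega
      simp [PySem.List.pyGet?, PySem.List.pyIdx?, h0, h1, h1.le, h2]
    simp only [scanLeftLoopA, hget, List.foldl_append, List.foldl_cons, List.foldl_nil]
    by_cases hx : x < c
    · simp [hx]
    · simp [hx, hcongr, ih]

-- ===== VERDICT (by name: the statement is the Claim_ definition above) =====
theorem scan_left_spec : Claim_equal_scan_left := by
  intro a_rows a_cols l_rows l_cols start _hDom
  unfold Spec_scan_left scan_left scan_left_alt
  cases h : (PySem.Dict.mk a_rows).get? start.1 with
  | none => simp [h]
  | some obstacles => simpa [h] using scanA_eq_foldl obstacles start.1 start.2
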